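-- pv_equiv track=rewrite | github.com/philipdaubmeier/pixelpast-core | src/pixelpast/ingestion/calendar/transform.py | _split_property_line
-- ===== SOURCE A (Python) =====
-- def _split_property_line(line: str) -> tuple[str, str]:
--     in_quotes = False
--     for index, character in enumerate(line):
--         if character == '"':
--             in_quotes = not in_quotes
--             continue
--         if character == ":" and not in_quotes:
--             return line[:index], line[index + 1 :]
--     raise ValueError(f"Invalid iCalendar property line '{line}'.")
-- ===== SOURCE B (Python) =====
-- def _split_property_line(line: str) -> tuple[str, str]:
--     head, sep, tail = line.partition(':')
--     while sep:
--         if head.count('"') % 2 == 0: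
--             return head, tail
--         nxt, sep, tail = tail.partition(':')
--         head = head + ':' + nxt
--     raise ValueError(f"Invalid iCalendar property line '{line}'.")
-- ===== Notes on version B (the rewrite author's own statement) =====
-- stated objective: alternative
-- what changed: Replaces A's per-character scan with a toggled in_quotes boolean by a loop over str.partition(':'): the head is extended across successive colons until the accumulated head contains an even number of double quotes, and the line is split there.
-- outside the precondition, e.g. on _split_property_line('A;B'): A raises ValueError, B raises ValueError
import Mathlib
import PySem

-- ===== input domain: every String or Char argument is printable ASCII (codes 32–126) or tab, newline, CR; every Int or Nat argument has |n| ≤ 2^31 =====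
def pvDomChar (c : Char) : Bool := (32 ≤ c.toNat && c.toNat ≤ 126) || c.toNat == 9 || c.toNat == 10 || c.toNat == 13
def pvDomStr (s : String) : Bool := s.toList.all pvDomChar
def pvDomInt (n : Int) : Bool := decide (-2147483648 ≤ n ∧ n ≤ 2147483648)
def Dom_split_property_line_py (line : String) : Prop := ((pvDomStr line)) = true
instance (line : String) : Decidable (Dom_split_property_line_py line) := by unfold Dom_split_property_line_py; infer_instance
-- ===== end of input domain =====

-- B replaces A's per-character scan with a toggled boolean by a str.partition(':') loop that
-- extends the head across colons until it holds an even number of '"' (objective: alternative).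

-- ===== PORT A =====
-- the for-loop over enumerate(line): rest = chars still to scan, index = current absolute
-- position, in_quotes = A's boolean state; none = the loop fell through (Python raises there).
-- line[:index] / line[index+1:] with 0 ≤ index are exactly take index / drop (index+1).
def splitA_go (line : List Char) (rest : List Char) (index : Nat) (in_quotes : Bool) :
    Option (List Char × List Char) :=
  match rest with
  | [] => none
  | c :: rs =>
    if c = '"' then splitA_go line rs (index + 1) (!in_quotes)
    else if c = ':' ∧ in_quotes = false then some (line.take index, line.drop (index + 1))
    else splitA_go line rs (index + 1) in_quotes

def split_property_line_py (line : String) : String × String :=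
  match splitA_go line.toList line.toList 0 false with
  | some (a, b) => (String.ofList a, String.ofList b)
  | none => ("", "")   -- Python raises ValueError here; excluded by Pre_

-- ===== PORT B =====
-- hand port of s.partition(':') for this one-character separator (exact: Python splits at the
-- FIRST occurrence, returning (before, sep, after) with sep = '' when absent — the middle
-- component is encoded as the Bool 'a separator was found').
def partitionColon (s : List Char) : List Char × Bool × List Char :=
  match s.idxOf? ':' with
  | some k => (s.take k, true, s.drop (k + 1))
  | none => (s, false, [])

-- idxOf? points inside the list (used by the termination proof of splitB_loop)
theorem idxOf?_colon_lt_length (s : List Char) (k : Nat) (h : s.idxOf? ':' = some k) :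
    k < s.length := by
  obtain ⟨hk, -⟩ := List.idxOf?_eq_some_iff.mp h
  exact hk

-- Source B's while-sep loop: head/sep/tail are the partition state; none = the loop fell through
-- (Python raises ValueError there).  head.count('"') % 2 == 0 is List.count; head + ':' + nxt
-- is head ++ ':' :: nxt.
def splitB_loop (head : List Char) (sep : Bool) (tail : List Char) :
    Option (List Char × List Char) :=
  if sep then
    if head.count '"' % 2 = 0 then some (head, tail)
    else
      let p := partitionColon tail
      splitB_loop (head ++ ':' :: p.1) p.2.1 p.2.2
  else none
termination_by tail.length + (cond sep 1 0)
decreasing_by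
  rename_i hsep _hodd
  cases hk : tail.idxOf? ':' with
  | none => simp [partitionColon, hk, hsep]
  | some k =>
    have hlt := idxOf?_colon_lt_length tail k hk
    simp [partitionColon, hk, hsep]
    omega

def split_property_line_py_alt (line : String) : String × String :=
  match partitionColon line.toList with
  | (head, sep, tail) =>
    match splitB_loop head sep tail with
    | some (a, b) => (String.ofList a, String.ofList b)
    | none => ("", "")   -- Python raises ValueError here; excluded by Pre_

-- ===== PRECONDITION & SPEC =====
-- Pre_ excludes exactly the lines with no colon outside double quotes, on which Python A
-- raises ValueError (and Python B raises the same ValueError).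
def Pre_split_property_line_py (line : String) : Prop :=
  ∃ i < line.toList.length,
    line.toList.getD i ' ' = ':' ∧ (line.toList.take i).count '"' % 2 = 0
instance (line : String) : Decidable (Pre_split_property_line_py line) := by
  unfold Pre_split_property_line_py; infer_instance

def pvWitness_split_property_line_py : String := "DTSTART;TZID=\"A:B\":20200101"

def Spec_split_property_line_py (line : String) (out : String × String) : Prop :=
  out = split_property_line_py_alt line
instance (line : String) (out : String × String) : Decidable (Spec_split_property_line_py line out) := by
  unfold Spec_split_property_line_py; infer_instance

-- ===== CLAIM (what is proved, stated in full; the proofs are below) =====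
def Claim_equal_split_property_line_py : Prop := ∀ (line : String), Dom_split_property_line_py line → Pre_split_property_line_py line → Spec_split_property_line_py line (split_property_line_py line)

-- ===== LEMMAS AND PROOFS =====

-- A's loop steps --------------------------------------------------------------
lemma A_quote (line t : List Char) (k : Nat) (inq : Bool) :
    splitA_go line ('"' :: t) k inq = splitA_go line t (k + 1) (!inq) := by
  simp [splitA_go]

lemma A_colon_even (line t : List Char) (k : Nat) :
    splitA_go line (':' :: t) k false = some (line.take k, line.drop (k + 1)) := by
  simp [splitA_go]

lemma A_step (line : List Char) (c : Char) (t : List Char) (k : Nat) (inq : Bool)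
    (hq : c ≠ '"') (h : ¬ (c = ':' ∧ inq = false)) :
    splitA_go line (c :: t) k inq = splitA_go line t (k + 1) inq := by
  simp only [splitA_go, if_neg hq, if_neg h]

-- B's loop equations (splitB_loop is well-founded; cite its unfolding once) ----
lemma B_false (head tail : List Char) : splitB_loop head false tail = none := by
  rw [splitB_loop.eq_def]; simp

lemma B_true_even (head tail : List Char) (h : head.count '"' % 2 = 0) :
    splitB_loop head true tail = some (head, tail) := by
  rw [splitB_loop.eq_def]; simp [h]

lemma B_true_odd (head tail : List Char) (h : ¬ head.count '"' % 2 = 0) :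
    splitB_loop head true tail =
      splitB_loop (head ++ ':' :: (partitionColon tail).1)
        (partitionColon tail).2.1 (partitionColon tail).2.2 := by
  rw [splitB_loop.eq_def]; simp [h]

-- B as a function of the absolute position k: 'the state of Source B's loop just after a
-- partition searching from position k' — none when no colon at index ≥ k, else the loop
-- entered with head = take j, tail = drop (j+1) at the colon's absolute index j = k + d.
def splitB_from (cs : List Char) (k : Nat) : Option (List Char × List Char) :=
  match (cs.drop k).idxOf? ':' with
  | none => none
  | some d => splitB_loop (cs.take (k + d)) true (cs.drop (k + d + 1))

lemma take_succ_getD (cs : List Char) (k : Nat) (hk : k < cs.length) :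
    cs.take (k + 1) = cs.take k ++ [cs.getD k ' '] := by
  rw [List.getD_eq_getElem cs ' ' hk]
  exact List.take_succ_eq_append_getElem hk

lemma drop_cons_getD (cs : List Char) (k : Nat) (hk : k < cs.length) :
    cs.drop k = cs.getD k ' ' :: cs.drop (k + 1) := by
  rw [List.getD_eq_getElem cs ' ' hk]
  exact (List.getElem_cons_drop hk).symm

-- shift: if the char at k is not a colon, the next colon at ≥ k is the next colon at ≥ k+1
lemma splitB_from_shift (cs : List Char) (k : Nat) (hk : k < cs.length)
    (hc : cs.getD k ' ' ≠ ':') : splitB_from cs k = splitB_from cs (k + 1) := by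
  unfold splitB_from
  rw [drop_cons_getD cs k hk, List.idxOf?_cons]
  simp only [beq_iff_eq]
  rw [if_neg hc]
  cases h : (cs.drop (k + 1)).idxOf? ':' with
  | none => simp
  | some d =>
    simp only [Option.map_some]
    rw [show k + (d + 1) = k + 1 + d by omega]

-- the char at k IS a colon: B's 'state after partition' is the loop entered at k
lemma splitB_from_colon (cs : List Char) (k : Nat) (hk : k < cs.length)
    (hc : cs.getD k ' ' = ':') :
    splitB_from cs k = splitB_loop (cs.take k) true (cs.drop (k + 1)) := by
  unfold splitB_from
  rw [drop_cons_getD cs k hk, hc, List.idxOf?_cons]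
  simp

-- unrolling Source B's loop once at a colon position k with odd head parity
lemma splitB_loop_odd (cs : List Char) (k : Nat) (hk : k < cs.length)
    (hc : cs.getD k ' ' = ':') (hodd : ¬ (cs.take k).count '"' % 2 = 0) :
    splitB_loop (cs.take k) true (cs.drop (k + 1)) = splitB_from cs (k + 1) := by
  rw [B_true_odd _ _ hodd]
  unfold partitionColon splitB_from
  cases h : (cs.drop (k + 1)).idxOf? ':' with
  | none => simp [B_false]
  | some d =>
    simp only
    have hhead : cs.take k ++ ':' :: (cs.drop (k + 1)).take d = cs.take (k + 1 + d) := by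
      rw [List.take_add, take_succ_getD cs k hk, hc]
      simp
    rw [hhead, List.drop_drop, show k + 1 + (d + 1) = k + 1 + d + 1 by omega]

-- the loop correspondence: A's scan from position k (with in_quotes = the quote parity of
-- the prefix scanned so far) equals Source B's partition loop looking for the next colon at ≥ k.
lemma splitA_go_eq_splitB_from (cs : List Char) :
    ∀ n k, cs.length - k ≤ n →
      splitA_go cs (cs.drop k) k (decide ((cs.take k).count '"' % 2 = 1)) =
      splitB_from cs k := by
  intro n
  induction n with
  | zero =>
    intro k hn
    have hk : cs.length ≤ k := by omega
    rw [List.drop_eq_nil_of_le hk, splitA_go]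
    unfold splitB_from
    rw [List.drop_eq_nil_of_le hk]
    simp
  | succ n ih =>
    intro k hn
    by_cases hk : k < cs.length
    · have hdrop := drop_cons_getD cs k hk
      have hcount : (cs.take (k + 1)).count '"' =
          (cs.take k).count '"' + (if cs.getD k ' ' = '"' then 1 else 0) := by
        rw [take_succ_getD cs k hk, List.count_append]
        simp [List.count_cons, List.getD]
      by_cases hq : cs.getD k ' ' = '"'
      · have hpar : (!decide ((cs.take k).count '"' % 2 = 1)) =
            decide ((cs.take (k + 1)).count '"' % 2 = 1) := by
          rw [hcount, if_pos hq]
          rcases Nat.mod_two_eq_zero_or_one ((cs.take k).count '"') with h | h <;>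
            simp [h, Nat.add_mod]
        rw [hdrop, hq, A_quote, hpar, ih (k + 1) (by omega),
            splitB_from_shift cs k hk (by rw [hq]; decide)]
      · have hpar : decide ((cs.take (k + 1)).count '"' % 2 = 1) =
            decide ((cs.take k).count '"' % 2 = 1) := by
          rw [hcount, if_neg hq]
          simp
        by_cases hcol : cs.getD k ' ' = ':'
        · rw [hdrop, hcol, splitB_from_colon cs k hk hcol]
          by_cases heven : (cs.take k).count '"' % 2 = 0
          · rw [show decide ((cs.take k).count '"' % 2 = 1) = false by simp; omega,
                A_colon_even, B_true_even _ _ heven]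
          · rw [show decide ((cs.take k).count '"' % 2 = 1) = true by simp; omega,
                A_step cs ':' _ k true (by decide) (by simp),
                splitB_loop_odd cs k hk hcol heven]
            have := ih (k + 1) (by omega)
            rw [hpar, show decide ((cs.take k).count '"' % 2 = 1) = true by simp; omega]
              at this
            exact this
        · rw [hdrop,
              A_step cs _ _ k _ hq (by rintro ⟨h, -⟩; exact hcol h),
              splitB_from_shift cs k hk hcol]
          have := ih (k + 1) (by omega)
          rw [hpar] at this
          exact this
    · have hk' : cs.length ≤ k := by omega
      rw [List.drop_eq_nil_of_le hk', splitA_go]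
      unfold splitB_from
      rw [List.drop_eq_nil_of_le hk']
      simp

-- B's top level (first partition + loop) is exactly splitB_from at position 0
lemma alt_eq_from (cs : List Char) :
    (match partitionColon cs with
     | (head, sep, tail) => splitB_loop head sep tail) = splitB_from cs 0 := by
  unfold partitionColon splitB_from
  rw [List.drop_zero]
  cases h : cs.idxOf? ':' with
  | none => simp [B_false]
  | some d => simp

-- ===== VERDICT (by name: the statement is the Claim_ definition above) =====
theorem split_property_line_py_spec : Claim_equal_split_property_line_py := by
  intro line _ _
  unfold Spec_split_property_line_py split_property_line_py split_property_line_py_alt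
  have h0 := splitA_go_eq_splitB_from line.toList line.toList.length 0 (by omega)
  rw [List.drop_zero] at h0
  have hb : (false : Bool) = decide ((line.toList.take 0).count '"' % 2 = 1) := by simp
  rw [hb, h0, ← alt_eq_from line.toList]
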